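-- pv_equiv track=rewrite | github.com/leoSchaedler/leosstash | Coding Exercises/Programming Logic/agrvai.py | numebota
-- ===== SOURCE A (Python) =====
-- def numebota(q,m):
--     a = len(q)
--     b = len(q[0])
--     c = len(m[0])
--     r = []
--     for i in range(a):
--         r.append([])
--         for j in range(c):
--             val = 0
--             for k in range(b):
--                     val += q[i][k]*m[k][j]
--             r[i].append(val)
--     m= r[0][1] + r[1][1]
--     j = r[1][0] + r[0][0]
--     return m,j
-- ===== SOURCE B (Python) =====
-- def numebota(q, m):
--     # Only the four entries r[0][0], r[0][1], r[1][0], r[1][1] of the product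
--     # are ever used, so compute just those in a single O(b) pass.
--     b = len(q[0])
--     e00 = e01 = e10 = e11 = 0
--     for k in range(b):
--         q0k = q[0][k]
--         q1k = q[1][k]
--         mk0 = m[k][0]
--         mk1 = m[k][1]
--         e00 += q0k * mk0
--         e01 += q0k * mk1
--         e10 += q1k * mk0
--         e11 += q1k * mk1
--     return e01 + e11, e10 + e00
-- ===== Notes on version B (the rewrite author's own statement) =====
-- stated objective: faster
-- what changed: Instead of building the full a x c product matrix with three nested loops, B computes only the four entries r[0][0], r[0][1], r[1][0], r[1][1] that the result uses, in one pass over k.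
import Mathlib
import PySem

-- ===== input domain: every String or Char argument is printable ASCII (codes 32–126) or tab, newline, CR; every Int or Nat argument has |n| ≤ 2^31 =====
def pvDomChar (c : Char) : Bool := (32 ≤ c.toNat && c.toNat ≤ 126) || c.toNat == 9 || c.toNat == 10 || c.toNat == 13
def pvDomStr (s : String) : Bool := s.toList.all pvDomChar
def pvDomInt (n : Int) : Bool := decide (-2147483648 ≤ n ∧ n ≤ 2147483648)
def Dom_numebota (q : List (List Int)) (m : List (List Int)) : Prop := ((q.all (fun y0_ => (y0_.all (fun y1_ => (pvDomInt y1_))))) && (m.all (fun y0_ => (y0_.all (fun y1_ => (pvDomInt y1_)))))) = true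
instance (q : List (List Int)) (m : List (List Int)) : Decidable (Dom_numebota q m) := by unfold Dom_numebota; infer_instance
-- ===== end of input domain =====

-- B computes only the four product entries the result uses (O(b) instead of O(a*b*c)).

-- ===== PORT A =====
-- indexing uses pyGetD; Pre_numebota restricts to inputs where every index is in range (elsewhere Python raises IndexError)
def numebota (q : List (List Int)) (m : List (List Int)) : Int × Int :=
  let a : Int := q.length
  let b : Int := (PySem.List.pyGetD q 0 ([] : List Int)).length
  let c : Int := (PySem.List.pyGetD m 0 ([] : List Int)).length
  let r : List (List Int) :=
    (PySem.List.pyRange 0 a 1).foldl (fun r i =>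
      r ++ [(PySem.List.pyRange 0 c 1).foldl (fun row j =>
        row ++ [(PySem.List.pyRange 0 b 1).foldl (fun val k =>
          val + PySem.List.pyGetD (PySem.List.pyGetD q i ([] : List Int)) k 0
              * PySem.List.pyGetD (PySem.List.pyGetD m k ([] : List Int)) j 0) 0]) []]) []
  let m' := PySem.List.pyGetD (PySem.List.pyGetD r 0 ([] : List Int)) 1 0
          + PySem.List.pyGetD (PySem.List.pyGetD r 1 ([] : List Int)) 1 0
  let j := PySem.List.pyGetD (PySem.List.pyGetD r 1 ([] : List Int)) 0 0
         + PySem.List.pyGetD (PySem.List.pyGetD r 0 ([] : List Int)) 0 0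
  (m', j)

-- ===== PORT B =====
def numebota_alt (q : List (List Int)) (m : List (List Int)) : Int × Int :=
  let b : Int := (PySem.List.pyGetD q 0 ([] : List Int)).length
  let s : Int × Int × Int × Int :=
    (PySem.List.pyRange 0 b 1).foldl (fun (s : Int × Int × Int × Int) k =>
      let q0k := PySem.List.pyGetD (PySem.List.pyGetD q 0 ([] : List Int)) k 0
      let q1k := PySem.List.pyGetD (PySem.List.pyGetD q 1 ([] : List Int)) k 0
      let mk0 := PySem.List.pyGetD (PySem.List.pyGetD m k ([] : List Int)) 0 0
      let mk1 := PySem.List.pyGetD (PySem.List.pyGetD m k ([] : List Int)) 1 0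
      (s.1 + q0k * mk0, s.2.1 + q0k * mk1, s.2.2.1 + q1k * mk0, s.2.2.2 + q1k * mk1))
      (0, 0, 0, 0)
  (s.2.1 + s.2.2.2, s.2.2.1 + s.1)

-- ===== PRECONDITION & SPEC =====
-- Pre_: exactly the inputs on which the Python A returns (at least 2 rows in q, at least 2
-- columns in m's first row, and every index q[i][k], m[k][j] used by A in range).
def Pre_numebota (q : List (List Int)) (m : List (List Int)) : Prop :=
  2 ≤ q.length ∧
  2 ≤ (PySem.List.pyGetD m 0 ([] : List Int)).length ∧
  (PySem.List.pyGetD q 0 ([] : List Int)).length ≤ m.length ∧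
  (∀ row ∈ q, (PySem.List.pyGetD q 0 ([] : List Int)).length ≤ row.length) ∧
  (∀ row ∈ m.take (PySem.List.pyGetD q 0 ([] : List Int)).length,
      (PySem.List.pyGetD m 0 ([] : List Int)).length ≤ row.length)
instance (q : List (List Int)) (m : List (List Int)) : Decidable (Pre_numebota q m) := by
  unfold Pre_numebota; infer_instance

def pvWitness_numebota : List (List Int) × List (List Int) := ([[1, 2], [3, 4]], [[5, 6], [7, 8]])

def Spec_numebota (q : List (List Int)) (m : List (List Int)) (out : Int × Int) : Prop := out = numebota_alt q m
instance (q : List (List Int)) (m : List (List Int)) (out : Int × Int) : Decidable (Spec_numebota q m out) := by unfold Spec_numebota; infer_instance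

-- ===== CLAIM (what is proved, stated in full; the proofs are below) =====
def Claim_equal_numebota : Prop := ∀ (q : List (List Int)) (m : List (List Int)), Dom_numebota q m → Pre_numebota q m → Spec_numebota q m (numebota q m)

-- ===== LEMMAS AND PROOFS =====

-- a fold with four independent additive accumulators is four sums
theorem fold4_sum (l : List Int) (f1 f2 f3 f4 : Int → Int) :
    l.foldl (fun (s : Int × Int × Int × Int) k =>
        (s.1 + f1 k, s.2.1 + f2 k, s.2.2.1 + f3 k, s.2.2.2 + f4 k)) (0, 0, 0, 0)
    = ((l.map f1).sum, (l.map f2).sum, (l.map f3).sum, (l.map f4).sum) := by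
  rw [PySem.List.foldl_prod_mk (f := fun acc k => acc + f1 k)
      (g := fun (acc : Int × Int × Int) k => (acc.1 + f2 k, acc.2.1 + f3 k, acc.2.2 + f4 k))]
  rw [PySem.List.foldl_prod_mk (f := fun acc k => acc + f2 k)
      (g := fun (acc : Int × Int) k => (acc.1 + f3 k, acc.2 + f4 k))]
  rw [PySem.List.foldl_prod_mk (f := fun acc k => acc + f3 k)
      (g := fun acc k => acc + f4 k)]
  simp [PySem.List.foldl_add]

-- ===== VERDICT (by name: the statement is the Claim_ definition above) =====
theorem numebota_spec : Claim_equal_numebota := by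
  intro q m _ hpre
  obtain ⟨ha, hc, -, -, -⟩ := hpre
  unfold Spec_numebota numebota numebota_alt
  simp only [PySem.List.foldl_append_singleton_eq_map, List.nil_append, fold4_sum]
  have h0a : (0 : Int) < (q.length : Int) := by exact_mod_cast Nat.lt_of_lt_of_le (by norm_num) ha
  have h1a : (1 : Int) < (q.length : Int) := by exact_mod_cast Nat.lt_of_lt_of_le (by norm_num) ha
  have h0c : (0 : Int) < ((PySem.List.pyGetD m 0 ([] : List Int)).length : Int) := by
    exact_mod_cast Nat.lt_of_lt_of_le (by norm_num) hc
  have h1c : (1 : Int) < ((PySem.List.pyGetD m 0 ([] : List Int)).length : Int) := by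
    exact_mod_cast Nat.lt_of_lt_of_le (by norm_num) hc
  rw [PySem.List.pyGetD_map_pyRange_of_nonneg _ _ _ _ (by norm_num) h0a,
      PySem.List.pyGetD_map_pyRange_of_nonneg _ _ _ _ (by norm_num) h1a,
      PySem.List.pyGetD_map_pyRange_of_nonneg _ _ _ _ (by norm_num) h0c,
      PySem.List.pyGetD_map_pyRange_of_nonneg _ _ _ _ (by norm_num) h1c,
      PySem.List.pyGetD_map_pyRange_of_nonneg _ _ _ _ (by norm_num) h0c,
      PySem.List.pyGetD_map_pyRange_of_nonneg _ _ _ _ (by norm_num) h1c]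
  simp [PySem.List.foldl_add]
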